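-- pv_equiv track=rewrite | github.com/shinrel22/thgaming-mubot-engine | src/utils/__init__.py | scan_string
-- ===== SOURCE A (Python) =====
-- def scan_string(
--         data: str,
--         pattern: str,
--         case_sensitive: bool = False,
--         max_results: int = 1
-- ) -> list[int]:
--     data = data.strip()
--     pattern = pattern.strip()
--
--     if not case_sensitive:
--         data = data.lower()
--         pattern = pattern.lower()
--
--     results = []
--
--     pattern_len = len(pattern)
--     if not pattern_len:
--         return results
--
--     # Precompute non-wildcard positions
--     non_wildcards = []
--     for idx, char in enumerate(pattern):
--         if char != '?':
--             non_wildcards.append((idx, char))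
--
--     last_matched_addr = None
--
--     for addr in range(len(data) - pattern_len + 1):
--         match = True
--
--         # ignore if the offset is in the last matched function
--         if last_matched_addr is not None:
--             if addr <= (last_matched_addr + pattern_len):
--                 continue
--
--         for pos, val in non_wildcards:
--             if data[addr + pos] != val:
--                 match = False
--                 break
--
--         if match:
--             last_matched_addr = addr
--             results.append(addr)
--             if len(results) >= max_results:
--                 return results
--
--     return results
-- ===== SOURCE B (Python) =====
-- import re
--
--
-- def scan_string(
--         data: str,
--         pattern: str,
--         case_sensitive: bool = False,
--         max_results: int = 1
-- ) -> list[int]: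
--     data = data.strip()
--     pattern = pattern.strip()
--
--     if not case_sensitive:
--         data = data.lower()
--         pattern = pattern.lower()
--
--     results = []
--
--     pattern_len = len(pattern)
--     if not pattern_len:
--         return results
--
--     # '?' is a single-character wildcard; everything else is literal.
--     regex = re.compile(
--         ''.join('.' if c == '?' else re.escape(c) for c in pattern),
--         re.DOTALL,
--     )
--
--     pos = 0
--     while True:
--         m = regex.search(data, pos)
--         if m is None:
--             return results
--         results.append(m.start())
--         if len(results) >= max_results:
--             return results
--         # skip past the match plus one extra character (non-overlap window)
--         pos = m.start() + pattern_len + 1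
-- ===== Notes on version B (the rewrite author's own statement) =====
-- stated objective: idiomatic
-- what changed: Replaces A's stateful scan over every offset (last_matched_addr skip flag plus a precomputed non-wildcard position list checked per offset) with a compiled regex ('?' -> '.', literals escaped, re.DOTALL) searched in a loop that jumps directly from each match to start+pattern_len+1.
import Mathlib
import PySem

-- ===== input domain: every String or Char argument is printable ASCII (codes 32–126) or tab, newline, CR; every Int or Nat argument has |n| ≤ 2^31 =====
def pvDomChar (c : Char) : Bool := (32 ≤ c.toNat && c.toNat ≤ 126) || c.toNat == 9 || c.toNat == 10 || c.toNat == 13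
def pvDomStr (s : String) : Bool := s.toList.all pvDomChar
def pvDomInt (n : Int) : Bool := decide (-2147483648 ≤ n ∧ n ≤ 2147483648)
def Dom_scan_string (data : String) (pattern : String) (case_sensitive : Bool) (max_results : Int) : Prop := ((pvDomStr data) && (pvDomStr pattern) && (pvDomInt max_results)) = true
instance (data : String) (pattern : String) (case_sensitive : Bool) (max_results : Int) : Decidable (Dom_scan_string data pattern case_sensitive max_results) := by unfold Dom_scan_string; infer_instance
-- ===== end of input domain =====

-- B replaces A's stateful scan over every offset (with a last-match skip flag and a
-- precomputed non-wildcard list) by an idiomatic regex-style search loop that jumps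
-- straight to the next match position; objective: idiomatic/alternative, same cost class.

-- ===== PORT A =====

-- data[i] for indices the loops keep in range (Python would raise only out of range,
-- which A never does: addr + pos < len(data) always holds on A's loop bounds).
def pvCharAt (l : List Char) (i : Nat) : Char := l.getD i ' '

-- "for idx, char in enumerate(pattern): if char != '?': non_wildcards.append((idx, char))"
def pvNonWild : List Char → Nat → List (Nat × Char)
  | [], _ => []
  | c :: cs, i => if c ≠ '?' then (i, c) :: pvNonWild cs (i + 1) else pvNonWild cs (i + 1)

-- A's main loop over addr ∈ range(len(data) - pattern_len + 1), carrying results and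
-- last_matched_addr; the inner for/break is the short-circuiting List.all.
def pvALoop (dl : List Char) (nw : List (Nat × Char)) (plen : Nat) (maxr : Int) :
    List Nat → Option Nat → List Int → List Int
  | [], _, results => results
  | addr :: rest, last, results =>
    if (match last with | some l => decide (addr ≤ l + plen) | none => false) = true then
      pvALoop dl nw plen maxr rest last results
    else if nw.all (fun pv => pvCharAt dl (addr + pv.1) == pv.2) then
      let results' := results ++ [(addr : Int)]
      if maxr ≤ (results'.length : Int) then results'
      else pvALoop dl nw plen maxr rest (some addr) results'
    else pvALoop dl nw plen maxr rest last results

def scan_string (data : String) (pattern : String) (case_sensitive : Bool) (max_results : Int) : List Int :=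
  let dl0 := PySem.Chars.strip data.toList
  let pl0 := PySem.Chars.strip pattern.toList
  let dl := if !case_sensitive then PySem.Chars.lower dl0 else dl0
  let pl := if !case_sensitive then PySem.Chars.lower pl0 else pl0
  let plen := pl.length
  if plen = 0 then []
  else pvALoop dl (pvNonWild pl 0) plen max_results (List.range (dl.length + 1 - plen)) none []

-- ===== PORT B =====

-- regex match of the compiled pattern at window start i: '?' → '.', letters literal
-- (re.DOTALL: '.' matches any char, like A's raw char comparison).
def pvWildAt (dl : List Char) : List Char → Nat → Bool
  | [], _ => true
  | c :: cs, i => (c == '?' || pvCharAt dl i == c) && pvWildAt dl cs (i + 1)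

-- regex.search(data, pos): first window start m ≥ pos (with m + len(pattern) ≤ len(data))
-- where the wildcard pattern matches; none if no match.
def pvSearch (dl pl : List Char) (pos : Nat) : Option Nat :=
  if pos + pl.length ≤ dl.length then
    if pvWildAt dl pl pos then some pos else pvSearch dl pl (pos + 1)
  else none
termination_by dl.length + 1 - pos

theorem pvSearch_bounds (dl pl : List Char) (pos m : Nat)
    (h : pvSearch dl pl pos = some m) : pos ≤ m ∧ m + pl.length ≤ dl.length := by
  fun_induction pvSearch dl pl pos with
  | case1 p hle hm => simp_all
  | case2 p hle hm ih => exact ⟨Nat.le_of_succ_le (ih h).1, (ih h).2⟩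
  | case3 p hle => simp_all

-- B's while-True loop: search from pos, append the match, stop at the cap,
-- else continue from m.start() + pattern_len + 1.
def pvBLoop (dl pl : List Char) (maxr : Int) (pos : Nat) (results : List Int) : List Int :=
  match h : pvSearch dl pl pos with
  | none => results
  | some m =>
    let results' := results ++ [(m : Int)]
    if maxr ≤ (results'.length : Int) then results'
    else pvBLoop dl pl maxr (m + pl.length + 1) results'
termination_by dl.length + 1 - pos
decreasing_by
  have := pvSearch_bounds dl pl pos m h
  omega

def scan_string_alt (data : String) (pattern : String) (case_sensitive : Bool) (max_results : Int) : List Int :=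
  let dl0 := PySem.Chars.strip data.toList
  let pl0 := PySem.Chars.strip pattern.toList
  let dl := if !case_sensitive then PySem.Chars.lower dl0 else dl0
  let pl := if !case_sensitive then PySem.Chars.lower pl0 else pl0
  let plen := pl.length
  if plen = 0 then []
  else pvBLoop dl pl max_results 0 []

-- ===== PRECONDITION & SPEC =====
def Spec_scan_string (data : String) (pattern : String) (case_sensitive : Bool) (max_results : Int) (out : List Int) : Prop := out = scan_string_alt data pattern case_sensitive max_results
instance (data : String) (pattern : String) (case_sensitive : Bool) (max_results : Int) (out : List Int) : Decidable (Spec_scan_string data pattern case_sensitive max_results out) := by unfold Spec_scan_string; infer_instance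

-- ===== CLAIM (what is proved, stated in full; the proofs are below) =====
def Claim_equal_scan_string : Prop := ∀ (data : String) (pattern : String) (case_sensitive : Bool) (max_results : Int), Dom_scan_string data pattern case_sensitive max_results → Spec_scan_string data pattern case_sensitive max_results (scan_string data pattern case_sensitive max_results)

-- ===== LEMMAS AND PROOFS =====

-- A's all-non-wildcards check at offset addr IS B's wildcard match at addr.
theorem nw_all (dl : List Char) :
    ∀ (pl : List Char) (s addr : Nat),
      ((pvNonWild pl s).all (fun pv => pvCharAt dl (addr + pv.1) == pv.2)) =
      pvWildAt dl pl (addr + s) := by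
  intro pl
  induction pl with
  | nil => intro s addr; simp [pvNonWild, pvWildAt]
  | cons c cs ih =>
    intro s addr
    by_cases hc : c = '?'
    · subst hc
      rw [show pvNonWild ('?' :: cs) s = pvNonWild cs (s + 1) by simp [pvNonWild]]
      rw [ih (s + 1) addr]
      simp [pvWildAt, Nat.add_assoc]
    · rw [show pvNonWild (c :: cs) s = (s, c) :: pvNonWild cs (s + 1) by simp [pvNonWild, hc]]
      simp only [List.all_cons]
      rw [ih (s + 1) addr]
      have hq : (c == '?') = false := by simpa using hc
      simp [pvWildAt, hq, Nat.add_assoc]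

theorem pvSearch_none (dl pl : List Char) (pos : Nat) (h : dl.length < pos + pl.length) :
    pvSearch dl pl pos = none := by
  rw [pvSearch]; simp [Nat.not_le.mpr h]

theorem pvBLoop_congr (dl pl : List Char) (maxr : Int) (p1 p2 : Nat) (res : List Int)
    (h : pvSearch dl pl p1 = pvSearch dl pl p2) :
    pvBLoop dl pl maxr p1 res = pvBLoop dl pl maxr p2 res := by
  rw [pvBLoop, pvBLoop, h]

-- once the scan is past last + plen, the stored last match no longer matters
theorem pvALoop_somePast (dl : List Char) (nw : List (Nat × Char)) (plen : Nat) (maxr : Int) :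
    ∀ (k pos m : Nat) (res : List Int), m + plen < pos →
      pvALoop dl nw plen maxr (List.range' pos k) (some m) res =
      pvALoop dl nw plen maxr (List.range' pos k) none res := by
  intro k
  induction k with
  | zero => intro pos m res _; simp [List.range', pvALoop]
  | succ k ih =>
    intro pos m res hm
    rw [List.range'_succ]
    simp only [pvALoop]
    rw [if_neg (show ¬((decide (pos ≤ m + plen)) = true) by simp; omega),
        if_neg (show ¬(false = true) by simp)]
    by_cases hmat : nw.all (fun pv => pvCharAt dl (pos + pv.1) == pv.2)
    · rw [if_pos hmat, if_pos hmat]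
    · rw [if_neg hmat, if_neg hmat]
      exact ih (pos + 1) m res (by omega)

-- the addresses in (last, last + plen] are skipped by the continue branch
theorem pvALoop_skip (dl : List Char) (nw : List (Nat × Char)) (plen N : Nat) (maxr : Int) :
    ∀ (j pos m : Nat) (res : List Int), pos ≤ m + plen + 1 → m + plen + 1 - pos ≤ j →
      pvALoop dl nw plen maxr (List.range' pos (N - pos)) (some m) res =
      pvALoop dl nw plen maxr (List.range' (m + plen + 1) (N - (m + plen + 1))) (some m) res := by
  intro j
  induction j with
  | zero =>
    intro pos m res h1 h2
    have : pos = m + plen + 1 := by omega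
    subst this; rfl
  | succ j ih =>
    intro pos m res h1 h2
    by_cases he : pos = m + plen + 1
    · subst he; rfl
    · have hlt : pos < m + plen + 1 := by omega
      by_cases hN : pos < N
      · have : N - pos = (N - (pos + 1)) + 1 := by omega
        rw [this, List.range'_succ]
        simp only [pvALoop]
        rw [if_pos (show (decide (pos ≤ m + plen)) = true by simp; omega)]
        exact ih (pos + 1) m res (by omega) (by omega)
      · have h0 : N - pos = 0 := by omega
        have h0' : N - (m + plen + 1) = 0 := by omega
        rw [h0, h0']
        simp [List.range', pvALoop]

-- main loop equivalence: A's address scan (no pending match) equals B's jump loop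
theorem main_loop (dl pl : List Char) (maxr : Int) :
    ∀ (k pos : Nat) (res : List Int), (dl.length + 1 - pl.length) - pos ≤ k →
      pvALoop dl (pvNonWild pl 0) pl.length maxr
        (List.range' pos ((dl.length + 1 - pl.length) - pos)) none res =
      pvBLoop dl pl maxr pos res := by
  intro k
  induction k with
  | zero =>
    intro pos res h
    have h0 : (dl.length + 1 - pl.length) - pos = 0 := by omega
    rw [h0]
    rw [pvBLoop, pvSearch_none dl pl pos (by omega)]
    simp [List.range', pvALoop]
  | succ k ih =>
    intro pos res h
    set N := dl.length + 1 - pl.length with hN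
    by_cases hlt : pos < N
    · have hwin : pos + pl.length ≤ dl.length := by omega
      have hstep : N - pos = (N - (pos + 1)) + 1 := by omega
      rw [hstep, List.range'_succ]
      simp only [pvALoop]
      rw [if_neg (show ¬(false = true) by simp)]
      have hmat := nw_all dl pl 0 pos
      rw [Nat.add_zero] at hmat
      by_cases hw : pvWildAt dl pl pos = true
      · rw [if_pos (by rw [hmat]; exact hw)]
        have hsr : pvSearch dl pl pos = some pos := by
          rw [pvSearch]; simp [hwin, hw]
        rw [pvBLoop, hsr]
        by_cases hcap : maxr ≤ ((res ++ [(pos : Int)]).length : Int)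
        · simp only [if_pos hcap]
        · simp only [if_neg hcap]
          rw [pvALoop_skip dl (pvNonWild pl 0) pl.length N maxr
              (pos + pl.length) (pos + 1) pos (res ++ [(pos : Int)]) (by omega) (by omega)]
          rw [pvALoop_somePast dl (pvNonWild pl 0) pl.length maxr
              (N - (pos + pl.length + 1)) (pos + pl.length + 1) pos (res ++ [(pos : Int)]) (by omega)]
          exact ih (pos + pl.length + 1) (res ++ [(pos : Int)]) (by omega)
      · have hw' : pvWildAt dl pl pos = false := by simpa using hw
        rw [if_neg (by rw [hmat, hw']; simp)]
        have hsr : pvSearch dl pl pos = pvSearch dl pl (pos + 1) := by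
          rw [pvSearch]; simp [hwin, hw']
        rw [pvBLoop_congr dl pl maxr pos (pos + 1) res hsr]
        exact ih (pos + 1) res (by omega)
    · have h0 : N - pos = 0 := by omega
      rw [h0]
      rw [pvBLoop, pvSearch_none dl pl pos (by omega)]
      simp [List.range', pvALoop]

-- ===== VERDICT (by name: the statement is the Claim_ definition above) =====
theorem scan_eq_top (dl pl : List Char) (maxr : Int) :
    (if pl.length = 0 then ([] : List Int)
     else pvALoop dl (pvNonWild pl 0) pl.length maxr
            (List.range (dl.length + 1 - pl.length)) none []) =
    (if pl.length = 0 then ([] : List Int) else pvBLoop dl pl maxr 0 []) := by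
  by_cases hp : pl.length = 0
  · rw [if_pos hp, if_pos hp]
  · rw [if_neg hp, if_neg hp, List.range_eq_range']
    exact main_loop dl pl maxr (dl.length + 1 - pl.length) 0 [] le_rfl

theorem scan_string_spec : Claim_equal_scan_string := by
  intro data pattern case_sensitive max_results _
  unfold Spec_scan_string scan_string scan_string_alt
  dsimp only
  exact scan_eq_top _ _ _
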